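-- pv_equiv track=rewrite | github.com/speedererer/math-projects | server2.py | generating_matrix_key
-- ===== SOURCE A (Python) =====
-- def generating_matrix_key(order):
--     """
--     This function generates a square matrix key of a particular pattern of order 'order'.
--     :param order: int. Order of the square matrix key.
--     :return: Returns a nested list of the matrix key
--     """
--     key = []
--     for r in range(0, order):
--         key_row = []
--         for c in range(0, order):
--             if r <= c:
--                 key_row.append(order - r)
--             else:
--                 key_row.append(order - c)
--         key.append(key_row)
--     return key
-- ===== SOURCE B (Python) =====
-- def generating_matrix_key(order):
--     """Same matrix key, built per row: each cell equals order - min(r, c), so row r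
--     is the descending prefix order..order-r+1 followed by order-r repeated."""
--     return [list(range(order, order - r, -1)) + [order - r] * (order - r)
--             for r in range(order)]
-- ===== Notes on version B (the rewrite author's own statement) =====
-- stated objective: simpler
-- what changed: B builds each row at once as a descending range prefix plus a constant fill (cell = order - min(r,c)) instead of A's per-cell loop with a branch.
import Mathlib
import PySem

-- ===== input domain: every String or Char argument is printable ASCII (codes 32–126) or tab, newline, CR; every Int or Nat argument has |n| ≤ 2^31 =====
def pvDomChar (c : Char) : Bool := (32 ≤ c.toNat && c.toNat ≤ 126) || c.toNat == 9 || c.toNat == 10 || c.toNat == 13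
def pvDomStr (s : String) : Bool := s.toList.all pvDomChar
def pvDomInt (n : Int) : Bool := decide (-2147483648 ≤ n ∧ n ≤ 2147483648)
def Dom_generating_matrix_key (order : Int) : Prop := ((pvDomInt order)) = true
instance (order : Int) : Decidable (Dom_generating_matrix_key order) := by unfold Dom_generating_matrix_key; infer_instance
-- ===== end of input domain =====

-- B builds each row as a descending range prefix plus a constant fill instead of a per-cell branch loop (simpler).
-- ===== PORT A =====
def generating_matrix_key (order : Int) : List (List Int) :=
  (PySem.List.pyRange 0 order 1).foldl
    (fun key r =>
      key ++ [(PySem.List.pyRange 0 order 1).foldl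
        (fun key_row c => key_row ++ [if r ≤ c then order - r else order - c]) []])
    []

-- ===== PORT B =====
def generating_matrix_key_alt (order : Int) : List (List Int) :=
  (PySem.List.pyRange 0 order 1).map
    (fun r => PySem.List.pyRange order (order - r) (-1)
      ++ List.replicate (order - r).toNat (order - r))

-- ===== PRECONDITION & SPEC =====
def Spec_generating_matrix_key (order : Int) (out : List (List Int)) : Prop := out = generating_matrix_key_alt order
instance (order : Int) (out : List (List Int)) : Decidable (Spec_generating_matrix_key order out) := by unfold Spec_generating_matrix_key; infer_instance

-- ===== CLAIM (what is proved, stated in full; the proofs are below) =====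
def Claim_equal_generating_matrix_key : Prop := ∀ (order : Int), Dom_generating_matrix_key order → Spec_generating_matrix_key order (generating_matrix_key order)

-- ===== LEMMAS AND PROOFS =====

-- ===== VERDICT (by name: the statement is the Claim_ definition above) =====
-- foldl with singleton append is map
theorem pv_foldl_append_map {α β : Type} (f : α → β) (l : List α) (init : List β) :
    l.foldl (fun acc x => acc ++ [f x]) init = init ++ l.map f := by
  induction l generalizing init with
  | nil => simp
  | cons x xs ih => simp [List.foldl, ih]

theorem pv_row_eq (order r : Int) (hr0 : 0 ≤ r) (hr : r < order) :
    (PySem.List.pyRange 0 order 1).map (fun c => if r ≤ c then order - r else order - c)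
      = PySem.List.pyRange order (order - r) (-1)
        ++ List.replicate (order - r).toNat (order - r) := by
  rw [PySem.List.pyRange_one_append 0 r order hr0 (le_of_lt hr), List.map_append]
  congr 1
  · rw [PySem.List.pyRange_neg_one]
    have h : order - (order - r) = r := by ring
    rw [h, PySem.List.pyRange_one]
    simp only [List.map_map, sub_zero]
    apply List.map_congr_left
    intro k hk
    simp only [Function.comp, zero_add]
    have hkr : (k : Int) < r := by
      have := List.mem_range.mp hk
      omega
    rw [if_neg (by omega)]
  · have hlen : (PySem.List.pyRange r order 1).length = (order - r).toNat :=
      PySem.List.length_pyRange_one r order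
    calc (PySem.List.pyRange r order 1).map (fun c => if r ≤ c then order - r else order - c)
        = (PySem.List.pyRange r order 1).map (fun _ => order - r) := by
          apply List.map_congr_left
          intro c hc
          have := (PySem.List.mem_pyRange_one).mp hc
          rw [if_pos this.1]
      _ = List.replicate (order - r).toNat (order - r) := by
          rw [List.map_const', hlen]

theorem generating_matrix_key_spec : Claim_equal_generating_matrix_key := by
  intro order _
  unfold Spec_generating_matrix_key generating_matrix_key generating_matrix_key_alt
  simp only [pv_foldl_append_map, List.nil_append]
  apply List.map_congr_left
  intro r hr
  have h := (PySem.List.mem_pyRange_one).mp hr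
  exact pv_row_eq order r h.1 h.2
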